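-- pv_equiv track=rewrite | github.com/NUZP-Cryptography/elliptic_curve | 4/lab_4_1_old.py | get_table_of_degrees
-- ===== SOURCE A (Python) =====
-- def mod_polynomials(s, f):
--     _s = s[:]
--     _f = f[:]
--
--     while len(_s) > len(f) - 1:
--         _t = []
--
--         for i in range(len(_s) - len(f)):
--             _f.append(0)
--
--         for i in range(len(_s)):
--             _t.append((_s[i] - _f[i]) % 2)
--
--         while _t[0] == 0:
--             _t.pop(0)
--             if len(_t) == 0:
--                 break
--
--         _s = _t[:]
--     # if len(_s) == 0:
--     #     _s = [0]
--     return _s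
--
-- def get_table_of_degrees(a, b, m, f):
--     table_of_degrees = []
--     for i in range(1, 2 ** m):
--         s = [1]
--         for j in range(i):
--             s.append(0)
--         r = mod_polynomials(s, f)
--         table_of_degrees.append([s, r])
--     return table_of_degrees
-- ===== SOURCE B (Python) =====
-- def get_table_of_degrees(a, b, m, f):
--     # Incremental: r holds x^(i-1) mod f; each step multiplies by x and reduces once.
--     table = []
--     r = [1]
--     for i in range(1, 2 ** m):
--         s = [1] + [0] * i
--         if r:
--             r = r + [0]
--         while len(r) > len(f) - 1:
--             t = [(r[j] - (f[j] if j < len(f) else 0)) % 2 for j in range(len(r))]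
--             k = 0
--             while k < len(t) and t[k] == 0:
--                 k += 1
--             r = t[k:]
--         table.append([s, r])
--     return table
-- ===== Notes on version B (the rewrite author's own statement) =====
-- stated objective: alternative
-- what changed: Instead of re-running the whole long division of x^i by f from scratch for every i, B keeps the previous remainder, multiplies it by x (append one 0) and reduces it mod f with at most one XOR-and-strip pass per step; the measured cost is the same because building the output rows dominates.
import Mathlib
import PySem

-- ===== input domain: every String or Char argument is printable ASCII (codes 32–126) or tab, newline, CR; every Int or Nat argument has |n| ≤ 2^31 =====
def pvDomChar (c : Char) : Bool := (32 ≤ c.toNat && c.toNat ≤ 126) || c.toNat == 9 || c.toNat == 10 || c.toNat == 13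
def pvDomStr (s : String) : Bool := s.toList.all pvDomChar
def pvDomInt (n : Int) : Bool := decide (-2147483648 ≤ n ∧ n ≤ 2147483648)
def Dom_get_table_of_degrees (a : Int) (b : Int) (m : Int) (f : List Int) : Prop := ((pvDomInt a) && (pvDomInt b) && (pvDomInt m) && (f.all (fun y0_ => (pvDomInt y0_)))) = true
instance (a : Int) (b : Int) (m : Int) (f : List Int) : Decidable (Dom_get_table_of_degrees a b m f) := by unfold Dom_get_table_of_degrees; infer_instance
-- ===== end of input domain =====

-- B replaces A's from-scratch long division of x^i by f for every i with one incremental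
-- shift-and-reduce of the previous remainder per step (objective: alternative).

-- ===== PORT A =====
-- 'while _t[0] == 0: _t.pop(0)' of A
def pvStrip : List Int → List Int
  | [] => []
  | x :: xs => if x = 0 then pvStrip xs else x :: xs

-- A's outer 'while len(_s) > len(f) - 1' loop, with the accumulating padded copy _f.
-- Ported with fuel s.length + 1: under Pre_ every pass strips at least one leading
-- coefficient, so the Python loop runs at most s.length times and the port is exact there.
def pvModLoop (f : List Int) : Nat → List Int → List Int → List Int
  | 0, s, _fa => s
  | fuel+1, s, fa =>
    if (s.length : Int) > (f.length : Int) - 1 then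
      pvModLoop f fuel
        (pvStrip ((List.range s.length).map
          (fun i => (s.getD i 0 - (fa ++ List.replicate (s.length - f.length) 0).getD i 0) % 2)))
        (fa ++ List.replicate (s.length - f.length) 0)
    else s

def mod_polynomials (s : List Int) (f : List Int) : List Int :=
  pvModLoop f (s.length + 1) s f

def get_table_of_degrees (a : Int) (b : Int) (m : Int) (f : List Int) : List (List (List Int)) :=
  (PySem.List.pyRange 1 (2 ^ m.toNat) 1).foldl
    (fun table i =>
      table ++ [[1 :: List.replicate i.toNat 0,
                 mod_polynomials (1 :: List.replicate i.toNat 0) f]]) []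

-- ===== PORT B =====
-- B's leading-zero scan 'k = 0; while ...; r = t[k:]'
def pvDropZeros (t : List Int) : List Int := t.dropWhile (fun x => x == 0)

-- one XOR-with-f-and-strip pass of B's inner while body
def pvStep (f : List Int) (r : List Int) : List Int :=
  pvDropZeros ((List.range r.length).map (fun j => (r.getD j 0 - f.getD j 0) % 2))

-- B's 'while len(r) > len(f) - 1' loop (fuel r.length + 1, exact under Pre_ as for A)
def pvReduce (f : List Int) : Nat → List Int → List Int
  | 0, r => r
  | fuel+1, r =>
    if (r.length : Int) > (f.length : Int) - 1 then pvReduce f fuel (pvStep f r) else r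

def get_table_of_degrees_alt (a : Int) (b : Int) (m : Int) (f : List Int) : List (List (List Int)) :=
  ((PySem.List.pyRange 1 (2 ^ m.toNat) 1).foldl
    (fun (st : List (List (List Int)) × List Int) i =>
      let r1 := if st.2 = [] then [] else st.2 ++ [0]
      let r2 := pvReduce f (r1.length + 1) r1
      (st.1 ++ [[1 :: List.replicate i.toNat 0, r2]], r2))
    ([], [1])).1

-- ===== PRECONDITION & SPEC =====
-- Pre_ excludes exactly the inputs on which the Python A does not return: m < 0 (2**m is a
-- float, so range(1, 2**m) raises TypeError) and m ≥ 1 with an f that is empty or has an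
-- even leading coefficient while len(f) ≤ 2^m, where A's while-loop never shrinks _s and
-- loops forever.  The conjunct m.toNat < f.length is logically redundant (k < 2^k) and only
-- keeps the Decidable instance from computing an infeasibly large power first.
def Pre_get_table_of_degrees (a : Int) (b : Int) (m : Int) (f : List Int) : Prop :=
  0 ≤ m ∧ (m = 0 ∨ (f ≠ [] ∧ f.getD 0 0 % 2 = 1) ∨ (m.toNat < f.length ∧ 2 ^ m.toNat < f.length))
instance (a : Int) (b : Int) (m : Int) (f : List Int) : Decidable (Pre_get_table_of_degrees a b m f) := by
  unfold Pre_get_table_of_degrees; infer_instance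

def pvWitness_get_table_of_degrees : Int × Int × Int × List Int := (0, 0, 2, [1, 0, 1, 1])

def Spec_get_table_of_degrees (a : Int) (b : Int) (m : Int) (f : List Int) (out : List (List (List Int))) : Prop := out = get_table_of_degrees_alt a b m f
instance (a : Int) (b : Int) (m : Int) (f : List Int) (out : List (List (List Int))) : Decidable (Spec_get_table_of_degrees a b m f out) := by unfold Spec_get_table_of_degrees; infer_instance

-- ===== CLAIM (what is proved, stated in full; the proofs are below) =====
def Claim_equal_get_table_of_degrees : Prop := ∀ (a : Int) (b : Int) (m : Int) (f : List Int), Dom_get_table_of_degrees a b m f → Pre_get_table_of_degrees a b m f → Spec_get_table_of_degrees a b m f (get_table_of_degrees a b m f)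

-- ===== LEMMAS AND PROOFS =====

-- abbreviations used only by the proofs
def pvR (f r : List Int) : List Int := pvReduce f (r.length + 1) r
def pvShiftRed (f r : List Int) : List Int :=
  pvReduce f ((if r = [] then [] else r ++ [0]).length + 1) (if r = [] then [] else r ++ [0])
def pvRst (f : List Int) : Nat → List Int
  | 0 => [1]
  | k+1 => pvShiftRed f (pvRst f k)
def pvXp (k : Nat) : List Int := 1 :: List.replicate k 0
def pvGood (r : List Int) : Prop := (∀ x ∈ r, x = 0 ∨ x = 1) ∧ (r ≠ [] → r.getD 0 0 = 1)

theorem pvStrip_eq (t : List Int) : pvStrip t = pvDropZeros t := by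
  induction t with
  | nil => rfl
  | cons x xs ih =>
    by_cases h : x = 0
    · simp [pvStrip, pvDropZeros, List.dropWhile_cons, h, ih]
    · simp [pvStrip, pvDropZeros, List.dropWhile_cons, h]

theorem pv_getD_rep0 (k n : Nat) : (List.replicate k (0:Int)).getD n 0 = 0 := by
  rcases lt_or_ge n k with h | h
  · exact List.getD_replicate 0 h
  · exact List.getD_eq_default _ _ (by simpa using h)

theorem pv_getD_append0 (fa : List Int) (k n : Nat) :
    (fa ++ List.replicate k (0:Int)).getD n 0 = fa.getD n 0 := by
  rcases lt_or_ge n fa.length with h | h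
  · rw [List.getD_append _ _ _ _ h]
  · rw [List.getD_append_right _ _ _ _ h, pv_getD_rep0, List.getD_eq_default _ _ h]

theorem pv_defuel (f : List Int) :
    ∀ (fuel : Nat) (s fa : List Int), (∀ i, fa.getD i 0 = f.getD i 0) →
      pvModLoop f fuel s fa = pvReduce f fuel s := by
  intro fuel
  induction fuel with
  | zero => intro s fa _; rfl
  | succ n ih =>
    intro s fa hfa
    simp only [pvModLoop, pvReduce]
    split
    · rw [pvStrip_eq]
      have h2 : ∀ i, (fa ++ List.replicate (s.length - f.length) (0:Int)).getD i 0 = f.getD i 0 := by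
        intro i; rw [pv_getD_append0]; exact hfa i
      have hmap : ((List.range s.length).map
            (fun i => (s.getD i 0 - (fa ++ List.replicate (s.length - f.length) 0).getD i 0) % 2))
          = ((List.range s.length).map (fun j => (s.getD j 0 - f.getD j 0) % 2)) := by
        apply List.map_congr_left; intro i _; rw [h2 i]
      rw [hmap, ih _ _ h2]
      rfl
    · rfl

theorem pv_mod_eq_R (s f : List Int) : mod_polynomials s f = pvR f s :=
  pv_defuel f (s.length + 1) s f (fun _ => rfl)

theorem pv_dz_head (t : List Int) (x : Int) (xs : List Int)
    (h : pvDropZeros t = x :: xs) : x ≠ 0 := by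
  induction t with
  | nil => simp [pvDropZeros] at h
  | cons y ys ih =>
    by_cases hy : y = 0
    · exact ih (by simpa [pvDropZeros, List.dropWhile_cons, hy] using h)
    · have h2 : y = x ∧ ys = xs := by simpa [pvDropZeros, List.dropWhile_cons, hy] using h
      rw [← h2.1]; exact hy

theorem pv_good_step (f r : List Int) : pvGood (pvStep f r) := by
  constructor
  · intro x hx
    have hx' : x ∈ (List.range r.length).map (fun j => (r.getD j 0 - f.getD j 0) % 2) :=
      (List.dropWhile_sublist _).subset hx
    obtain ⟨j, _, hj⟩ := List.mem_map.mp hx'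
    omega
  · intro hne
    obtain ⟨x, xs, hx⟩ := List.exists_cons_of_ne_nil hne
    have hx0 : x ≠ 0 := pv_dz_head _ _ _ hx
    have hmem : x ∈ pvStep f r := by rw [hx]; exact List.mem_cons_self
    have hx' : x ∈ (List.range r.length).map (fun j => (r.getD j 0 - f.getD j 0) % 2) :=
      (List.dropWhile_sublist _).subset hmem
    obtain ⟨j, _, hj⟩ := List.mem_map.mp hx'
    rw [hx]
    simp only [List.getD_cons_zero]
    omega

theorem pv_step_len (f r : List Int) (hodd : f.getD 0 0 % 2 = 1) (hg : pvGood r)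
    (hlen : f.length ≤ r.length) (hf : f ≠ []) : (pvStep f r).length < r.length := by
  have hf1 : 0 < f.length := List.length_pos_of_ne_nil hf
  have hr : 1 ≤ r.length := by omega
  obtain ⟨k, hk⟩ : ∃ k, r.length = k + 1 := ⟨r.length - 1, by omega⟩
  have hrne : r ≠ [] := by cases r <;> simp_all
  have hhead : r.getD 0 0 = 1 := hg.2 hrne
  have ht0 : (r.getD 0 0 - f.getD 0 0) % 2 = 0 := by omega
  have : (List.range r.length).map (fun j => (r.getD j 0 - f.getD j 0) % 2)
      = 0 :: (List.map (fun j => (r.getD j 0 - f.getD j 0) % 2) ((List.range k).map Nat.succ)) := by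
    rw [hk, List.range_succ_eq_map, List.map_cons, ht0]
  unfold pvStep pvDropZeros
  rw [this, List.dropWhile_cons]
  simp only [show ((0:Int) == 0) = true from rfl, if_true]
  have hle := List.length_dropWhile_le (fun x : Int => x == 0)
      (List.map (fun j => (r.getD j 0 - f.getD j 0) % 2) ((List.range k).map Nat.succ))
  simp only [List.length_map, List.length_range] at hle
  omega

theorem pv_fuel_irrel (f : List Int) (hf : f ≠ []) (hodd : f.getD 0 0 % 2 = 1) :
    ∀ (fuel1 : Nat) (r : List Int) (fuel2 : Nat), pvGood r →
      r.length ≤ fuel1 → r.length ≤ fuel2 → pvReduce f fuel1 r = pvReduce f fuel2 r := by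
  have hfpos : 1 ≤ f.length := by cases f <;> simp_all
  intro fuel1
  induction fuel1 with
  | zero =>
    intro r fuel2 _ h1 _
    have : r = [] := by cases r <;> simp_all
    subst this
    cases fuel2 with
    | zero => rfl
    | succ k => simp only [pvReduce]; rw [if_neg (by push_cast; omega)]
  | succ n ih =>
    intro r fuel2 hg h1 h2
    cases fuel2 with
    | zero =>
      have : r = [] := by cases r <;> simp_all
      subst this
      simp only [pvReduce]; rw [if_neg (by push_cast; omega)]
    | succ k =>
      simp only [pvReduce]
      split
      · rename_i hcond
        have hlen : f.length ≤ r.length := by push_cast at hcond; omega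
        have hdec := pv_step_len f r hodd hg hlen hf
        exact ih (pvStep f r) k (pv_good_step f r) (by omega) (by omega)
      · rfl

theorem pv_absorb (f : List Int) (hf : f ≠ []) (hodd : f.getD 0 0 % 2 = 1)
    (r : List Int) (hg : pvGood r) (hlen : f.length ≤ r.length) :
    pvR f r = pvR f (pvStep f r) := by
  have hfpos : 1 ≤ f.length := by cases f <;> simp_all
  have hdec := pv_step_len f r hodd hg hlen hf
  unfold pvR
  conv_lhs => rw [show r.length + 1 = (r.length) + 1 from rfl]
  simp only [pvReduce]
  rw [if_pos (by push_cast; omega)]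
  exact pv_fuel_irrel f hf hodd r.length (pvStep f r) ((pvStep f r).length + 1)
    (pv_good_step f r) (by omega) (by omega)

theorem pv_R_noreduce (f r : List Int) (h : r.length < f.length) : pvR f r = r := by
  unfold pvR
  simp only [pvReduce]
  rw [if_neg (by push_cast; omega)]

theorem pv_good_append0 (s : List Int) (hg : pvGood s) (hne : s ≠ []) : pvGood (s ++ [0]) := by
  constructor
  · intro x hx
    rcases List.mem_append.mp hx with h | h
    · exact hg.1 x h
    · simp at h; omega
  · intro _
    cases s with
    | nil => exact absurd rfl hne
    | cons y ys => simpa using hg.2 hne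

theorem pv_dz_append0 (t : List Int) :
    pvDropZeros (t ++ [0]) = if pvDropZeros t = [] then [] else pvDropZeros t ++ [0] := by
  induction t with
  | nil => rfl
  | cons y ys ih =>
    by_cases hy : y = 0
    · simpa [pvDropZeros, List.dropWhile_cons, hy] using ih
    · simp [pvDropZeros, List.dropWhile_cons, hy]

theorem pv_step_append0 (f r : List Int) (hlen : f.length ≤ r.length) :
    pvStep f (r ++ [0]) = if pvStep f r = [] then [] else pvStep f r ++ [0] := by
  have hmap : (List.range (r ++ [0]).length).map
        (fun j => ((r ++ [0]).getD j 0 - f.getD j 0) % 2)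
      = ((List.range r.length).map (fun j => (r.getD j 0 - f.getD j 0) % 2)) ++ [0] := by
    rw [List.length_append]
    simp only [List.length_singleton]
    rw [List.range_succ, List.map_append]
    congr 1
    · apply List.map_congr_left
      intro j hj
      rw [List.mem_range] at hj
      rw [List.getD_append _ _ _ _ hj]
    · simp only [List.map_cons, List.map_nil]
      rw [List.getD_append_right r [0] 0 r.length le_rfl, List.getD_eq_default _ _ hlen]
      norm_num
  unfold pvStep
  rw [hmap, pv_dz_append0]

theorem pv_append0 (f : List Int) (hf : f ≠ []) (hodd : f.getD 0 0 % 2 = 1) :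
    ∀ (n : Nat) (s : List Int), s.length ≤ n → pvGood s → s ≠ [] →
      pvR f (s ++ [0]) = pvShiftRed f (pvR f s) := by
  have hfpos : 1 ≤ f.length := by cases f <;> simp_all
  intro n
  induction n with
  | zero => intro s h _ hne; cases s <;> simp_all
  | succ n ih =>
    intro s hsn hg hne
    rcases lt_or_ge s.length f.length with hlt | hge
    · -- no reduction on s: pvR f s = s, and both sides are the same pvReduce call
      rw [pv_R_noreduce f s hlt]
      unfold pvShiftRed
      rw [if_neg hne]
      unfold pvR
      rw [List.length_append]
    · have habs := pv_absorb f hf hodd s hg hge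
      have habs' := pv_absorb f hf hodd (s ++ [0]) (pv_good_append0 s hg hne)
        (by rw [List.length_append]; omega)
      rw [habs', pv_step_append0 f s hge, habs]
      by_cases hstep : pvStep f s = []
      · rw [hstep]
        rw [if_pos rfl]
        rw [pv_R_noreduce f [] (by simpa using hfpos)]
        unfold pvShiftRed
        rw [if_pos rfl]
        simp only [List.length_nil, pvReduce]
        rw [if_neg (by push_cast; omega)]
      · rw [if_neg hstep]
        have hdec := pv_step_len f s hodd hg hge hf
        exact ih (pvStep f s) (by omega) (pv_good_step f s) hstep

theorem pv_good_xp (k : Nat) : pvGood (pvXp k) := by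
  constructor
  · intro x hx
    rcases List.mem_cons.mp hx with h | h
    · right; exact h
    · left; exact List.eq_of_mem_replicate h
  · intro _; rfl

theorem pv_xp_append (k : Nat) : pvXp k ++ [0] = pvXp (k + 1) := by
  simp [pvXp, List.replicate_succ']

theorem pv_xp_ne_nil (k : Nat) : pvXp k ≠ [] := by simp [pvXp]

theorem pv_xp_length (k : Nat) : (pvXp k).length = k + 1 := by simp [pvXp]

-- the chain step in the generic-f branch: shift-and-reduce of x^(k-1)'s remainder is x^k's
theorem pv_chainA (f : List Int) (hf : f ≠ []) (hodd : f.getD 0 0 % 2 = 1) (k : Nat) :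
    pvShiftRed f (pvR f (pvXp k)) = pvR f (pvXp (k + 1)) := by
  rw [← pv_xp_append]
  exact (pv_append0 f hf hodd (pvXp k).length (pvXp k) le_rfl (pv_good_xp k) (pv_xp_ne_nil k)).symm

-- the chain step in the long-f branch: nothing ever reduces
theorem pv_chainB (f : List Int) (k : Nat) (h : k + 2 < f.length) :
    pvShiftRed f (pvR f (pvXp k)) = pvR f (pvXp (k + 1)) := by
  rw [pv_R_noreduce f (pvXp k) (by rw [pv_xp_length]; omega),
      pv_R_noreduce f (pvXp (k + 1)) (by rw [pv_xp_length]; omega)]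
  unfold pvShiftRed
  rw [if_neg (pv_xp_ne_nil k), pv_xp_append]
  simp only [pvReduce]
  rw [if_neg (by rw [pv_xp_length]; push_cast; omega)]

theorem pv_rst_one (f : List Int) : pvRst f 1 = pvR f (pvXp 1) := by
  simp only [pvRst, pvShiftRed, pvR, pvXp]
  norm_num

theorem pv_rst_eq (f : List Int) (N : Nat)
    (hchain : ∀ k : Nat, 1 ≤ k → k + 1 ≤ N - 1 → pvShiftRed f (pvR f (pvXp k)) = pvR f (pvXp (k + 1))) :
    ∀ i : Nat, 1 ≤ i → i ≤ N - 1 → pvRst f i = pvR f (pvXp i) := by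
  intro i
  induction i with
  | zero => omega
  | succ j ih =>
    intro _ hle
    cases Nat.eq_or_lt_of_le (show 1 ≤ j + 1 from by omega) with
    | inl h => rw [← h]; exact pv_rst_one f
    | inr h =>
      have hj : 1 ≤ j := by omega
      rw [show j + 1 = j + 1 from rfl, pvRst, ih hj (by omega), hchain j hj hle]

-- the paired fold: B's fold carries exactly A's table plus the running remainder
theorem pv_fold_pair (f : List Int) (N : Nat)
    (hA : ∀ i : Nat, 1 ≤ i → i ≤ N - 1 → pvRst f i = pvR f (pvXp i)) :
    (PySem.List.pyRange 1 (N : Int) 1).foldl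
      (fun (st : List (List (List Int)) × List Int) i =>
        let r1 := if st.2 = [] then [] else st.2 ++ [0]
        let r2 := pvReduce f (r1.length + 1) r1
        (st.1 ++ [[1 :: List.replicate i.toNat 0, r2]], r2))
      ([], [1])
    = ((PySem.List.pyRange 1 (N : Int) 1).foldl
        (fun table i =>
          table ++ [[1 :: List.replicate i.toNat 0,
                     mod_polynomials (1 :: List.replicate i.toNat 0) f]]) [],
       pvRst f (N - 1)) := by
  induction N with
  | zero =>
    rw [PySem.List.pyRange_one_eq_nil (by norm_num)]
    rfl
  | succ n ih =>
    rcases Nat.eq_zero_or_pos n with hn | hn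
    · subst hn
      rw [PySem.List.pyRange_one_eq_nil (show (((0:Nat) + 1 : Nat) : Int) ≤ 1 by norm_num)]
      rfl
    · have hsplit : PySem.List.pyRange 1 ((n + 1 : Nat) : Int) 1
          = PySem.List.pyRange 1 (n : Int) 1 ++ [(n : Int)] := by
        push_cast
        exact PySem.List.pyRange_one_succ_right (by exact_mod_cast hn)
      have hA' : ∀ i : Nat, 1 ≤ i → i ≤ n - 1 → pvRst f i = pvR f (pvXp i) := by
        intro i h1 h2; exact hA i h1 (by omega)
      rw [hsplit, List.foldl_append, List.foldl_append, ih hA']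
      simp only [List.foldl_cons, List.foldl_nil, Int.toNat_natCast]
      have hstate : pvReduce f ((if pvRst f (n - 1) = [] then [] else pvRst f (n - 1) ++ [0]).length + 1)
          (if pvRst f (n - 1) = [] then [] else pvRst f (n - 1) ++ [0]) = pvRst f n := by
        obtain ⟨j, hj⟩ : ∃ j, n = j + 1 := ⟨n - 1, by omega⟩
        subst hj
        simp only [Nat.add_sub_cancel]
        rfl
      simp only [Nat.add_sub_cancel]
      rw [hstate, pv_mod_eq_R, hA n hn (by omega)]
      rfl

-- ===== VERDICT (by name: the statement is the Claim_ definition above) =====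
theorem get_table_of_degrees_spec : Claim_equal_get_table_of_degrees := by
  intro a b m f _hdom hpre
  unfold Spec_get_table_of_degrees get_table_of_degrees get_table_of_degrees_alt
  obtain ⟨hm, hcase⟩ := hpre
  have hcast : (2 : Int) ^ m.toNat = ((2 ^ m.toNat : Nat) : Int) := by push_cast; rfl
  rw [hcast]
  set N := 2 ^ m.toNat with hN
  have hA : ∀ i : Nat, 1 ≤ i → i ≤ N - 1 → pvRst f i = pvR f (pvXp i) := by
    rcases hcase with hm0 | ⟨hf, hodd⟩ | ⟨_, hlong⟩
    · intro i h1 h2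
      have hN1 : N = 1 := by norm_num [hN, hm0]
      omega
    · exact pv_rst_eq f N (fun k hk _ => pv_chainA f hf hodd k)
    · refine pv_rst_eq f N (fun k hk hkle => pv_chainB f k ?_)
      have hNpos : 1 ≤ N := Nat.one_le_two_pow
      omega
  rw [pv_fold_pair f N hA]
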